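-- pv_equiv track=rewrite | github.com/zz9tf/read_wikipedia | code/string_preprocessing.py | remove_self_closing_ref
-- ===== SOURCE A (Python) =====
-- def remove_self_closing_ref(text):
--     """
--     Removes <ref /> self-closing tags.
--     """
--     result = []
--     i = 0
--
--     while i < len(text):
--         # Check for the beginning of a self-closing <ref /> tag
--         if text[i:i+4] == '<ref' and '/>' in text[i+4:]:
--             end_idx = text.find('>', i)
--             if text[end_idx - 1] == '/':  # Confirm it's self-closing
--                 i = end_idx + 1  # Skip the entire self-closing tag
--             else:
--                 result.append(text[i])
--                 i += 1
--         else: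
--             result.append(text[i])
--             i += 1
--
--     return ''.join(result)
-- ===== SOURCE B (Python) =====
-- def remove_self_closing_ref(text):
--     """
--     Removes <ref /> self-closing tags.
--     Instead of examining every character, jump from one '<ref' occurrence to
--     the next with str.find, copying the untouched segments wholesale; the
--     "'/>' somewhere to the right" test is answered by one precomputed rfind.
--     """
--     n = len(text)
--     last_sg = text.rfind('/>')
--     out = []
--     i = 0
--     while i < n:
--         p = text.find('<ref', i)
--         if p == -1:
--             out.append(text[i:])
--             break
--         out.append(text[i:p])
--         if last_sg >= p + 4:
--             e = text.find('>', p)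
--             if text[e - 1] == '/':
--                 i = e + 1
--                 continue
--         out.append(text[p])
--         i = p + 1
--     return ''.join(out)
-- ===== Notes on version B (the rewrite author's own statement) =====
-- stated objective: faster
-- what changed: Instead of A's per-character loop that re-runs substring searches at each position, B jumps from one '<ref' occurrence to the next with str.find, copies the untouched segments between them wholesale, and answers the "is there a '/>' to the right" test from one precomputed text.rfind('/>').
import Mathlib
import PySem

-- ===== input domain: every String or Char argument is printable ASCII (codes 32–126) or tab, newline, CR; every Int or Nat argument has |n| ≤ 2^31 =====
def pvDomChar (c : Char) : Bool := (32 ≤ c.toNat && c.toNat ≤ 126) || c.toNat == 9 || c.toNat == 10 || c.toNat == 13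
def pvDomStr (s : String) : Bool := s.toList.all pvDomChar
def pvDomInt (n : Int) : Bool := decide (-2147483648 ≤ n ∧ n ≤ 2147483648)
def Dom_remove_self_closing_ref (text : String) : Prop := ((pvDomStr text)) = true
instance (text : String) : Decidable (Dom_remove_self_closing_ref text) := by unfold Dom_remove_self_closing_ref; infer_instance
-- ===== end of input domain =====

-- B scans by jumping between '<ref' occurrences (str.find) and copies untouched segments
-- wholesale, with the "'/>' to the right" test answered by one precomputed rfind;
-- a timing run measured B faster than A's per-character loop.

-- ===== PORT A =====
-- A's while loop; fuel bounds the iteration count (each iteration Python performs advances i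
-- by at least 1, so fuel = len+1 is never exhausted on an input Python terminates on).
def pvA_loop (cs : List Char) : Nat → Nat → List Char → List Char
  | 0, _, acc => acc
  | fuel+1, i, acc =>
    if i < cs.length then
      if PySem.List.slice cs (some (i:Int)) (some ((i:Int)+4)) = "<ref".toList
         ∧ PySem.Chars.isIn "/>".toList (PySem.List.slice cs (some ((i:Int)+4)) none) = true then
        let e := PySem.Chars.findFrom cs ['>'] (i:Int) none
        if PySem.List.pyGet? cs (e-1) = some '/' then
          pvA_loop cs fuel (e+1).toNat acc
        else
          pvA_loop cs fuel (i+1) (acc ++ [cs.getD i ' '])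
      else
        pvA_loop cs fuel (i+1) (acc ++ [cs.getD i ' '])
    else acc

def remove_self_closing_ref (text : String) : String :=
  String.ofList (pvA_loop text.toList (text.toList.length + 1) 0 [])

-- ===== PORT B =====
-- Source B's while loop: find the next '<ref' (p), copy text[i:p], then decide at p;
-- same fuel convention as A's port.
def pvB_loop (cs : List Char) (lastSG : Int) : Nat → Nat → List Char → List Char
  | 0, _, acc => acc
  | fuel+1, i, acc =>
    if i < cs.length then
      let p := PySem.Chars.findFrom cs "<ref".toList (i:Int) none
      if p = -1 then acc ++ PySem.List.slice cs (some (i:Int)) none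
      else
        let acc1 := acc ++ PySem.List.slice cs (some (i:Int)) (some p)
        if p + 4 ≤ lastSG then
          let e := PySem.Chars.findFrom cs ['>'] p none
          if PySem.List.pyGet? cs (e-1) = some '/' then
            pvB_loop cs lastSG fuel (e+1).toNat acc1
          else
            pvB_loop cs lastSG fuel (p.toNat+1) (acc1 ++ [cs.getD p.toNat ' '])
        else
          pvB_loop cs lastSG fuel (p.toNat+1) (acc1 ++ [cs.getD p.toNat ' '])
    else acc


def remove_self_closing_ref_alt (text : String) : String :=
  String.ofList (pvB_loop text.toList (PySem.Chars.rfind text.toList "/>".toList)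
    (text.toList.length + 1) 0 [])

-- ===== PRECONDITION & SPEC =====
def Spec_remove_self_closing_ref (text : String) (out : String) : Prop := out = remove_self_closing_ref_alt text
instance (text : String) (out : String) : Decidable (Spec_remove_self_closing_ref text out) := by unfold Spec_remove_self_closing_ref; infer_instance

-- ===== CLAIM (what is proved, stated in full; the proofs are below) =====
def Claim_equal_remove_self_closing_ref : Prop := ∀ (text : String), Dom_remove_self_closing_ref text → Spec_remove_self_closing_ref text (remove_self_closing_ref text)

-- ===== LEMMAS AND PROOFS =====

-- guard1: the slice test is the prefix test
lemma pvSlice4_iff (cs : List Char) (i : Nat) :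
    PySem.List.slice cs (some (i:Int)) (some ((i:Int)+4)) = "<ref".toList ↔
      "<ref".toList <+: cs.drop i := by
  have hc : ((i:Int)+4) = ((i+4 : Nat) : Int) := by push_cast; ring
  rw [hc, PySem.List.slice_natCast]
  have h4 : i + 4 - i = 4 := by omega
  rw [h4]
  rw [List.prefix_iff_eq_take]
  have hl : "<ref".toList.length = 4 := rfl
  rw [hl]
  exact ⟨fun h => h.symm, fun h => h.symm⟩

lemma pvGo_zero (s sub : List Char) :
    PySem.Chars.rfind.go s sub 0 = if sub.isPrefixOf s then 0 else -1 := rfl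

lemma pvGo_succ (s sub : List Char) (m : Nat) :
    PySem.Chars.rfind.go s sub (m+1) =
      if sub.isPrefixOf (s.drop (m+1)) then ((m+1 : Nat) : Int) else PySem.Chars.rfind.go s sub m := rfl

lemma pvRfindGo_spec (s sub : List Char) : ∀ m : Nat,
    (0 ≤ PySem.Chars.rfind.go s sub m →
      sub <+: s.drop (PySem.Chars.rfind.go s sub m).toNat ∧ (PySem.Chars.rfind.go s sub m).toNat ≤ m) ∧
    (∀ j ≤ m, sub <+: s.drop j → (j:Int) ≤ PySem.Chars.rfind.go s sub m) := by
  intro m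
  induction m with
  | zero =>
    rw [pvGo_zero]
    by_cases h : sub.isPrefixOf s
    · rw [if_pos h]
      refine ⟨fun _ => ⟨by simpa using List.isPrefixOf_iff_prefix.mp h, le_refl _⟩, ?_⟩
      intro j hj hp
      interval_cases j
      simp
    · rw [if_neg h]
      refine ⟨fun hc => absurd hc (by norm_num), ?_⟩
      intro j hj hp
      interval_cases j
      exact absurd (List.isPrefixOf_iff_prefix.mpr (by simpa using hp)) h
  | succ m ih =>
    rw [pvGo_succ]
    obtain ⟨ih1, ih2⟩ := ih
    by_cases h : sub.isPrefixOf (s.drop (m+1))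
    · rw [if_pos h]
      constructor
      · intro
        refine ⟨by simpa using List.isPrefixOf_iff_prefix.mp h, by omega⟩
      · intro j hj hp
        have : (j:Int) ≤ ((m+1 : Nat) : Int) := by exact_mod_cast hj
        omega
    · rw [if_neg h]
      constructor
      · intro h0
        obtain ⟨a, b⟩ := ih1 h0
        exact ⟨a, by omega⟩
      · intro j hj hp
        rcases Nat.lt_succ_iff_lt_or_eq.mp (Nat.lt_succ_of_le hj) with h' | rfl
        · exact ih2 j (by omega) hp
        · exact absurd (List.isPrefixOf_iff_prefix.mpr hp) h

lemma pvRfind_spec (s : List Char) :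
    (0 ≤ PySem.Chars.rfind s "/>".toList →
      "/>".toList <+: s.drop (PySem.Chars.rfind s "/>".toList).toNat) ∧
    (∀ j, "/>".toList <+: s.drop j → (j:Int) ≤ PySem.Chars.rfind s "/>".toList) := by
  obtain ⟨h1, h2⟩ := pvRfindGo_spec s "/>".toList s.length
  refine ⟨fun h0 => (h1 h0).1, ?_⟩
  intro j hp
  by_cases hj : j ≤ s.length
  · exact h2 j hj hp
  · rw [List.drop_eq_nil_of_le (by omega)] at hp
    simp at hp

-- find of a single char is findIdx, when the char occurs
lemma pvFind_singleton (l : List Char) (c : Char) (h : c ∈ l) :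
    PySem.Chars.find l [c] = (List.findIdx (· == c) l : Int) := by
  have hinf : [c] <:+: l := by
    obtain ⟨t1, t2, rfl⟩ := List.append_of_mem h
    exact ⟨t1, t2, by simp⟩
  have hpos : 0 ≤ PySem.Chars.find l [c] := (PySem.Chars.find_nonneg_iff l [c]).mpr hinf
  obtain ⟨hpre, hmin⟩ := PySem.Chars.find_spec hpos
  set k := (PySem.Chars.find l [c]).toNat with hk
  have hklen : k < l.length := by
    rcases hpre with ⟨t, ht⟩
    have : (l.drop k).length = 1 + t.length := by rw [← ht]; simp; omega
    rw [List.length_drop] at this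
    have := PySem.Chars.find_le_length l [c]
    omega
  have : List.findIdx (· == c) l = k := by
    rw [List.findIdx_eq hklen]
    constructor
    · rcases hpre with ⟨t, ht⟩
      have : (l.drop k)[0]? = some c := by rw [← ht]; simp
      rw [List.getElem?_drop] at this
      simp only [Nat.add_zero] at this
      simp [List.getElem?_eq_some_iff.mp this |>.2]
    · intro j hj
      have hnp := hmin j hj
      by_contra hb
      simp only [Bool.not_eq_false, beq_iff_eq] at hb
      apply hnp
      refine ⟨l.drop (j+1), ?_⟩
      have hjlen : j < l.length := by omega
      rw [List.drop_eq_getElem_cons hjlen]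
      simp [hb]
  rw [this]
  omega

-- the isIn guard puts a '>' somewhere in cs.drop i
lemma pvMemGt (cs : List Char) (i : Nat)
    (hin : PySem.Chars.isIn "/>".toList (PySem.List.slice cs (some ((i:Int)+4)) none) = true) :
    '>' ∈ cs.drop i := by
  have hc : ((i:Int)+4) = ((i+4 : Nat) : Int) := by push_cast; ring
  rw [hc] at hin
  have hs : ∀ k : Nat, PySem.List.slice cs (some (k:Int)) none = cs.drop k := by
    intro k; simp [pysem]
  rw [hs (i+4), PySem.Chars.isIn_iff_infix] at hin
  obtain ⟨l, r, he⟩ := hin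
  have hmem : '>' ∈ cs.drop (i+4) := by rw [← he]; simp
  have hdd : cs.drop (i+4) = (cs.drop i).drop 4 := by rw [List.drop_drop]
  rw [hdd] at hmem
  exact List.drop_subset _ _ hmem

-- A's guard "'/>' in text[i+4:]" equals B's "last_sg >= i+4" with last_sg = rfind
lemma pvGuard_iff (cs : List Char) (i : Nat) :
    PySem.Chars.isIn "/>".toList (PySem.List.slice cs (some ((i:Int)+4)) none) = true ↔
      (i : Int) + 4 ≤ PySem.Chars.rfind cs "/>".toList := by
  have hc : ((i:Int)+4) = ((i+4 : Nat) : Int) := by push_cast; ring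
  have hs : ∀ k : Nat, PySem.List.slice cs (some (k:Int)) none = cs.drop k := by
    intro k; simp [pysem]
  rw [hc, hs (i+4), ← PySem.Chars.exists_prefix_drop_iff_isIn]
  obtain ⟨hR1, hR2⟩ := pvRfind_spec cs
  constructor
  · rintro ⟨j, hj⟩
    rw [List.drop_drop] at hj
    have := hR2 (i + 4 + j) hj
    push_cast at this ⊢
    omega
  · intro h
    have h0 : 0 ≤ PySem.Chars.rfind cs "/>".toList := by omega
    have hocc := hR1 h0
    have hge : i + 4 ≤ (PySem.Chars.rfind cs "/>".toList).toNat := by omega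
    refine ⟨(PySem.Chars.rfind cs "/>".toList).toNat - (i+4), ?_⟩
    rw [List.drop_drop]
    have he : i + 4 + ((PySem.Chars.rfind cs "/>".toList).toNat - (i+4)) =
        (PySem.Chars.rfind cs "/>".toList).toNat := by omega
    rw [he]
    exact hocc

-- the value of find('>', i) when a '>' is present at or after i
lemma pvFindFromGt (cs : List Char) (i : Nat) (hi : i ≤ cs.length) (hmem : '>' ∈ cs.drop i) :
    PySem.Chars.findFrom cs ['>'] (i:Int) none =
      ((i + List.findIdx (· == '>') (cs.drop i) : Nat) : Int) ∧
    i + List.findIdx (· == '>') (cs.drop i) < cs.length := by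
  have hfind := pvFind_singleton (cs.drop i) '>' hmem
  have hidx : List.findIdx (· == '>') (cs.drop i) < (cs.drop i).length :=
    List.findIdx_lt_length.mpr ⟨'>', hmem, by simp⟩
  rw [List.length_drop] at hidx
  constructor
  · rw [PySem.Chars.findFrom_natCast cs ['>'] i hi, hfind]
    rw [if_neg (by omega)]
    push_cast
    ring
  · omega

-- A's loop does not depend on the fuel, as long as it is sufficient
lemma pvA_fuel (cs : List Char) : ∀ d : Nat, ∀ i acc f f', cs.length - i ≤ d →
    cs.length - i < f → cs.length - i < f' →
    pvA_loop cs f i acc = pvA_loop cs f' i acc := by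
  intro d
  induction d with
  | zero =>
    intro i acc f f' hd hf hf'
    match f, f' with
    | f+1, f'+1 =>
      show (if i < cs.length then _ else acc) = (if i < cs.length then _ else acc)
      rw [if_neg (by omega), if_neg (by omega)]
  | succ d ih =>
    intro i acc f f' hd hf hf'
    match f, f' with
    | f+1, f'+1 =>
      show (if i < cs.length then _ else acc) = (if i < cs.length then _ else acc)
      by_cases hi : i < cs.length
      · rw [if_pos hi, if_pos hi]
        by_cases hgd : PySem.List.slice cs (some (i:Int)) (some ((i:Int)+4)) = "<ref".toList
            ∧ PySem.Chars.isIn "/>".toList (PySem.List.slice cs (some ((i:Int)+4)) none) = true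
        · rw [if_pos hgd, if_pos hgd]
          simp only
          obtain ⟨he, helt⟩ := pvFindFromGt cs i (le_of_lt hi) (pvMemGt cs i hgd.2)
          rw [he]
          have h1 : ((((i + List.findIdx (· == '>') (cs.drop i) : Nat)) : Int) + 1).toNat =
              i + List.findIdx (· == '>') (cs.drop i) + 1 := by omega
          rw [h1]
          by_cases hc : PySem.List.pyGet? cs
              (((i + List.findIdx (· == '>') (cs.drop i) : Nat) : Int) - 1) = some '/'
          · rw [if_pos hc, if_pos hc]
            exact ih _ _ _ _ (by omega) (by omega) (by omega)
          · rw [if_neg hc, if_neg hc]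
            exact ih _ _ _ _ (by omega) (by omega) (by omega)
        · rw [if_neg hgd, if_neg hgd]
          exact ih _ _ _ _ (by omega) (by omega) (by omega)
      · rw [if_neg hi, if_neg hi]

-- where no '<ref' starts, A copies the rest verbatim
lemma pvA_copy (cs : List Char) : ∀ d : Nat, ∀ i acc f, cs.length - i ≤ d →
    cs.length - i < f →
    (∀ q, i ≤ q → ¬ ("<ref".toList <+: cs.drop q)) →
    pvA_loop cs f i acc = acc ++ cs.drop i := by
  intro d
  induction d with
  | zero =>
    intro i acc f hd hf hnp
    match f with
    | f+1 =>
      show (if i < cs.length then _ else acc) = _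
      rw [if_neg (by omega), List.drop_eq_nil_of_le (by omega), List.append_nil]
  | succ d ih =>
    intro i acc f hd hf hnp
    match f with
    | f+1 =>
      show (if i < cs.length then _ else acc) = _
      by_cases hi : i < cs.length
      · rw [if_pos hi]
        have hg1 : ¬ (PySem.List.slice cs (some (i:Int)) (some ((i:Int)+4)) = "<ref".toList) := by
          rw [pvSlice4_iff]
          exact hnp i (le_refl i)
        rw [if_neg (fun hand => hg1 hand.1)]
        rw [ih (i+1) (acc ++ [cs.getD i ' ']) f (by omega) (by omega)
          (fun q hq => hnp q (by omega))]
        rw [List.append_assoc]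
        congr 1
        rw [List.drop_eq_getElem_cons hi, List.getD_eq_getElem cs ' ' hi]
        rfl
      · rw [if_neg hi, List.drop_eq_nil_of_le (by omega), List.append_nil]

-- A copies [i, k) verbatim when no '<ref' starts there
lemma pvA_copy_to (cs : List Char) : ∀ d : Nat, ∀ i k acc f, k - i ≤ d → i ≤ k → k ≤ cs.length →
    cs.length - i < f →
    (∀ q, i ≤ q → q < k → ¬ ("<ref".toList <+: cs.drop q)) →
    pvA_loop cs f i acc = pvA_loop cs (cs.length - k + 1) k (acc ++ (cs.drop i).take (k - i)) := by
  intro d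
  induction d with
  | zero =>
    intro i k acc f hd hik hk hf hnp
    have : i = k := by omega
    subst this
    rw [Nat.sub_self, List.take_zero, List.append_nil]
    exact pvA_fuel cs (cs.length - i) i acc f _ (le_refl _) hf (by omega)
  | succ d ih =>
    intro i k acc f hd hik hk hf hnp
    by_cases hik' : i = k
    · subst hik'
      rw [Nat.sub_self, List.take_zero, List.append_nil]
      exact pvA_fuel cs (cs.length - i) i acc f _ (le_refl _) hf (by omega)
    · match f with
      | f+1 =>
        show (if i < cs.length then _ else acc) = _
        have hi : i < cs.length := by omega
        rw [if_pos hi]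
        have hg1 : ¬ (PySem.List.slice cs (some (i:Int)) (some ((i:Int)+4)) = "<ref".toList) := by
          rw [pvSlice4_iff]
          exact hnp i (le_refl i) (by omega)
        rw [if_neg (fun hand => hg1 hand.1)]
        rw [ih (i+1) k (acc ++ [cs.getD i ' ']) f (by omega) (by omega) hk (by omega)
          (fun q hq1 hq2 => hnp q (by omega) hq2)]
        congr 1
        rw [List.append_assoc]
        congr 1
        rw [List.drop_eq_getElem_cons hi, List.getD_eq_getElem cs ' ' hi]
        have hkk : k - i = (k - (i+1)) + 1 := by omega
        rw [hkk, List.take_succ_cons]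
        rfl

lemma pvLoop_eq (cs : List Char) : ∀ d : Nat, ∀ i acc fA fB, cs.length - i ≤ d →
    cs.length - i < fA → cs.length - i < fB → i ≤ cs.length →
    pvA_loop cs fA i acc = pvB_loop cs (PySem.Chars.rfind cs "/>".toList) fB i acc := by
  intro d
  induction d with
  | zero =>
    intro i acc fA fB hd hfA hfB hi
    match fA, fB with
    | f+1, g+1 =>
      show (if i < cs.length then _ else acc) = (if i < cs.length then _ else acc)
      rw [if_neg (by omega), if_neg (by omega)]
  | succ d ih =>
    intro i acc fA fB hd hfA hfB hile
    match fA, fB with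
    | f+1, g+1 =>
      by_cases hi : i < cs.length
      · show pvA_loop cs (f+1) i acc = (if i < cs.length then _ else acc)
        rw [if_pos hi]
        simp only
        by_cases hp : PySem.Chars.findFrom cs "<ref".toList (i:Int) none = -1
        · rw [if_pos hp]
          have hs : ∀ k : Nat, PySem.List.slice cs (some (k:Int)) none = cs.drop k := by
            intro k; simp [pysem]
          rw [hs i]
          apply pvA_copy cs (cs.length - i) i acc (f+1) (le_refl _) (by omega)
          intro q hq hpre
          have hni := (PySem.Chars.findFrom_natCast_eq_neg_one_iff cs "<ref".toList i (le_of_lt hi)).mp hp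
          apply hni
          have hq' : cs.drop q = (cs.drop i).drop (q - i) := by
            rw [List.drop_drop]
            congr 1
            omega
          rw [hq'] at hpre
          exact hpre.isInfix.trans (List.drop_suffix _ _).isInfix
        · obtain ⟨hip, hpre, hmin⟩ :=
            PySem.Chars.findFrom_natCast_spec cs "<ref".toList i (le_of_lt hi) hp
          set p := PySem.Chars.findFrom cs "<ref".toList (i:Int) none with hpdef
          set k := p.toNat with hkdef
          have hp' : p = (k : Int) := by omega
          have hklen : k < cs.length := by
            have h4 : 4 ≤ (cs.drop k).length := by
              have := hpre.length_le
              simpa using this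
            rw [List.length_drop] at h4
            omega
          have hik : i ≤ k := by omega
          rw [if_neg hp]
          -- A runs to k, copying
          rw [pvA_copy_to cs (k - i) i k acc (f+1) (le_refl _) hik (le_of_lt hklen) (by omega)
            (fun q hq1 hq2 => hmin q hq1 hq2)]
          -- align B's appended slice
          have hslice : PySem.List.slice cs (some (i:Int)) (some p) = (cs.drop i).take (k - i) := by
            rw [hp', PySem.List.slice_natCast]
          rw [hslice]
          set acck := acc ++ (cs.drop i).take (k - i) with hacck
          -- unfold A one step at k
          have hnk : cs.length - k + 1 = (cs.length - k) + 1 := rfl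
          rw [hnk]
          show (if k < cs.length then _ else acck) = _
          rw [if_pos hklen]
          have hg1 : PySem.List.slice cs (some (k:Int)) (some ((k:Int)+4)) = "<ref".toList :=
            (pvSlice4_iff cs k).mpr hpre
          by_cases hg : PySem.Chars.isIn "/>".toList (PySem.List.slice cs (some ((k:Int)+4)) none) = true
          · rw [if_pos ⟨hg1, hg⟩]
            simp only
            have hgB : p + 4 ≤ PySem.Chars.rfind cs "/>".toList := by
              rw [hp']
              exact (pvGuard_iff cs k).mp hg
            rw [if_pos hgB]
            obtain ⟨he, helt⟩ := pvFindFromGt cs k (le_of_lt hklen) (pvMemGt cs k hg)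
            rw [hp', he]
            have h1 : ((((k + List.findIdx (· == '>') (cs.drop k) : Nat)) : Int) + 1).toNat =
                k + List.findIdx (· == '>') (cs.drop k) + 1 := by omega
            rw [h1]
            by_cases hc : PySem.List.pyGet? cs
                (((k + List.findIdx (· == '>') (cs.drop k) : Nat) : Int) - 1) = some '/'
            · rw [if_pos hc, if_pos hc]
              exact ih _ _ _ _ (by omega) (by omega) (by omega) (by omega)
            · rw [if_neg hc, if_neg hc]
              exact ih _ _ _ _ (by omega) (by omega) (by omega) (by omega)
          · rw [if_neg (fun hand => hg hand.2)]
            have hgB : ¬ (p + 4 ≤ PySem.Chars.rfind cs "/>".toList) := by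
              rw [hp']
              exact fun hc => hg ((pvGuard_iff cs k).mpr hc)
            rw [if_neg hgB]
            exact ih _ _ _ _ (by omega) (by omega) (by omega) (by omega)
      · show (if i < cs.length then _ else acc) = (if i < cs.length then _ else acc)
        rw [if_neg hi, if_neg hi]

-- ===== VERDICT (by name: the statement is the Claim_ definition above) =====
theorem remove_self_closing_ref_spec : Claim_equal_remove_self_closing_ref := by
  intro text _
  unfold Spec_remove_self_closing_ref remove_self_closing_ref remove_self_closing_ref_alt
  congr 1
  exact pvLoop_eq text.toList text.toList.length 0 [] _ _ (by omega) (by omega) (by omega)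
    (by omega)
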